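-- pv_equiv track=rewrite | github.com/jcolinpatrick/kryptos | scripts/grille/e_morse_palindrome_analysis_v2.py | parse_raw_line
-- ===== SOURCE A (Python) =====
-- def parse_raw_line(line):
--     """Parse a line of raw Morse into a list of Morse characters.
--
--     Characters are separated by single spaces.
--     Words are separated by multiple spaces (3+) or explicit markers.
--     Returns list of (morse_pattern, is_word_break_before).
--     """
--     # Split by multiple spaces to find word boundaries
--     # Then split each word by single spaces for character boundaries
--     result = []
--
--     # Normalize the line
--     line = line.replace('·', '.').replace('\u00b7', '.')
--     line = line.replace('–', '-').replace('\u2013', '-').replace('\u2014', '-')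
--     line = line.strip()
--
--     if not line:
--         return result
--
--     # Track position to detect multi-space gaps
--     i = 0
--     current_char = ''
--     space_count = 0
--     word_break_pending = False
--
--     for ch in line:
--         if ch in '.-':
--             if space_count >= 3:
--                 word_break_pending = True
--             if current_char and space_count > 0:
--                 # Emit previous character
--                 if current_char in '.-' or all(c in '.-' for c in current_char):
--                     result.append((current_char, word_break_pending if len(result) > 0 else False))
--                     word_break_pending = False
--                 current_char = ch
--             else:
--                 current_char += ch
--             space_count = 0
--         elif ch == ' ':
--             space_count += 1
--             if space_count == 1 and current_char:
--                 # Single space = character boundary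
--                 result.append((current_char, word_break_pending if len(result) > 0 else False))
--                 word_break_pending = False
--                 current_char = ''
--         i += 1
--
--     # Don't forget last character
--     if current_char:
--         result.append((current_char, word_break_pending if len(result) > 0 else False))
--
--     return result
-- ===== SOURCE B (Python) =====
-- def parse_raw_line(line):
--     """Parse a line of raw Morse into a list of (morse_pattern, is_word_break_before).
--
--     Filter-then-tokenize: keep only '.', '-' and ' ' (other chars are transparent),
--     split on single spaces, count the empty pieces as the gap between tokens,
--     and flag a token as word break when the gap before it is >= 3 spaces
--     (never for the first token).
--     """
--     line = line.replace('·', '.').replace('\u00b7', '.')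
--     line = line.replace('–', '-').replace('\u2013', '-').replace('\u2014', '-')
--     line = line.strip()
--     filtered = ''.join(c for c in line if c in '.- ')
--     result = []
--     gap = 0
--     for piece in filtered.split(' '):
--         if piece == '':
--             gap += 1
--         else:
--             result.append((piece, len(result) > 0 and gap + 1 >= 3))
--             gap = 0
--     return result
-- ===== Notes on version B (the rewrite author's own statement) =====
-- stated objective: simpler
-- what changed: Replaces A's single-pass character state machine (current_char/space_count/word_break_pending with a dead emit branch) by filtering the line down to morse marks and spaces, splitting on single spaces, and folding over the pieces, counting empty pieces as the inter-token space gap.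
import Mathlib
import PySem

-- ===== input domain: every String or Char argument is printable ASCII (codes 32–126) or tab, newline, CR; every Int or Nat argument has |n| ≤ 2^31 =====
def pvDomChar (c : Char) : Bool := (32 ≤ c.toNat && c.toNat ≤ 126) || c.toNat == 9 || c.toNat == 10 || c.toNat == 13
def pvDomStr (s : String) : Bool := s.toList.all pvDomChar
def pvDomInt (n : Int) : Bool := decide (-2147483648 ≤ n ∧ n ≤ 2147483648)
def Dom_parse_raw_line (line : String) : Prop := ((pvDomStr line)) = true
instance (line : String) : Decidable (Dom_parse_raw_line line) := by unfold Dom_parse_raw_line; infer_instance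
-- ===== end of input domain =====

-- B replaces A's single-pass character state machine by filter-to-'.- ', split on single
-- spaces, and a fold over the pieces counting empty pieces as the gap (objective: simpler).

-- ===== PORT A =====
-- Loop body of A's `for ch in line`. State: (result, current_char, space_count, word_break_pending).
-- current_char is held as a List Char (Python string built by +=); space_count is a count
-- starting at 0 and only incremented, held as Nat.
def pvStepA (st : List (String × Bool) × List Char × Nat × Bool) (ch : Char) :
    List (String × Bool) × List Char × Nat × Bool :=
  let (res, cc, sc, pending) := st
  if ch = '.' ∨ ch = '-' then
    let pending := if sc ≥ 3 then true else pending
    if cc ≠ [] ∧ sc > 0 then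
      -- this branch is unreachable at run time (sc > 0 forces cc = []); ported literally
      if PySem.Chars.isIn cc ['.', '-'] ∨ cc.all (fun c => c = '.' ∨ c = '-') then
        (res ++ [(String.ofList cc, if res.length > 0 then pending else false)], [ch], 0, false)
      else
        (res, [ch], 0, pending)
    else
      (res, cc ++ [ch], 0, pending)
  else if ch = ' ' then
    let sc := sc + 1
    if sc = 1 ∧ cc ≠ [] then
      (res ++ [(String.ofList cc, if res.length > 0 then pending else false)], [], sc, false)
    else
      (res, cc, sc, pending)
  else
    (res, cc, sc, pending)

-- A's loop also keeps `i`, written (`i += 1`) and never read; carried as the second component.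
def pvStepAI (st : (List (String × Bool) × List Char × Nat × Bool) × Nat) (ch : Char) :
    (List (String × Bool) × List Char × Nat × Bool) × Nat :=
  (pvStepA st.1 ch, st.2 + 1)

-- A's `for ch in line` loop followed by the final `if current_char:` emission.
def pvAfinI (ws : List Char) : List (String × Bool) :=
  let st := ws.foldl pvStepAI ((([] : List (String × Bool)), ([] : List Char), 0, false), 0)
  let (res, cc, _sc, pending) := st.1
  if cc ≠ [] then res ++ [(String.ofList cc, if res.length > 0 then pending else false)] else res

def parse_raw_line (line : String) : List (String × Bool) :=
  let line := PySem.Str.replace (PySem.Str.replace line "·" ".") "·" "."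
  let line := PySem.Str.replace (PySem.Str.replace (PySem.Str.replace line "–" "-") "–" "-") "—" "-"
  let line := PySem.Str.strip line
  if line = "" then []
  else pvAfinI line.toList

-- ===== PORT B =====
-- Loop body of B's `for piece in filtered.split(' ')`. State: (result, gap).
def pvStepB (st : List (String × Bool) × Nat) (piece : List Char) : List (String × Bool) × Nat :=
  if piece = [] then (st.1, st.2 + 1)
  else (st.1 ++ [(String.ofList piece, decide (st.1.length > 0) && decide (st.2 + 1 ≥ 3))], 0)

-- B's body after normalization: filter to '.- ', split on ' ', fold over the pieces.
def pvTailB (t : String) : List (String × Bool) :=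
  let filtered := t.toList.filter (fun c => c = '.' ∨ c = '-' ∨ c = ' ')
  let pieces := List.splitOn ' ' filtered   -- filtered.split(' ')
  (pieces.foldl pvStepB (([] : List (String × Bool)), 0)).1

def parse_raw_line_alt (line : String) : List (String × Bool) :=
  let line := PySem.Str.replace (PySem.Str.replace line "·" ".") "·" "."
  let line := PySem.Str.replace (PySem.Str.replace (PySem.Str.replace line "–" "-") "–" "-") "—" "-"
  let line := PySem.Str.strip line
  pvTailB line

-- ===== PRECONDITION & SPEC =====
def Spec_parse_raw_line (line : String) (out : List (String × Bool)) : Prop := out = parse_raw_line_alt line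
instance (line : String) (out : List (String × Bool)) : Decidable (Spec_parse_raw_line line out) := by unfold Spec_parse_raw_line; infer_instance

-- ===== CLAIM (what is proved, stated in full; the proofs are below) =====
def Claim_equal_parse_raw_line : Prop := ∀ (line : String), Dom_parse_raw_line line → Spec_parse_raw_line line (parse_raw_line line)

-- ===== LEMMAS AND PROOFS =====

-- A's final step (emit the last character) applied to the loop's end state.
def pvAfin (st : List (String × Bool) × List Char × Nat × Bool) (ws : List Char) : List (String × Bool) :=
  let (res, cc, _sc, pending) := ws.foldl pvStepA st
  if cc ≠ [] then res ++ [(String.ofList cc, if res.length > 0 then pending else false)] else res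

-- B's piece loop as a structural recursion (proof-side view of foldl pvStepB).
def pvBfold (res : List (String × Bool)) (gap : Nat) : List (List Char) → List (String × Bool)
  | [] => res
  | p :: ps =>
      if p = [] then pvBfold res (gap + 1) ps
      else pvBfold (res ++ [(String.ofList p, decide (res.length > 0) && decide (gap + 1 ≥ 3))]) 0 ps

theorem pvFoldAI (ws : List Char) (st : List (String × Bool) × List Char × Nat × Bool) (i : Nat) :
    (ws.foldl pvStepAI (st, i)).1 = ws.foldl pvStepA st := by
  induction ws generalizing st i with
  | nil => rfl
  | cons c ws ih => simpa [pvStepAI] using ih (pvStepA st c) (i + 1)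

theorem pvStepA_junk (st : List (String × Bool) × List Char × Nat × Bool) (c : Char)
    (h : ¬ (c = '.' ∨ c = '-' ∨ c = ' ')) : pvStepA st c = st := by
  obtain ⟨res, cc, sc, pending⟩ := st
  push Not at h
  simp [pvStepA, h.1, h.2.1, h.2.2]

theorem pvFoldA_filter (ws : List Char) (st : List (String × Bool) × List Char × Nat × Bool) :
    ws.foldl pvStepA st = (ws.filter (fun c => decide (c = '.' ∨ c = '-' ∨ c = ' '))).foldl pvStepA st := by
  induction ws generalizing st with
  | nil => rfl
  | cons c ws ih =>
      by_cases hc : c = '.' ∨ c = '-' ∨ c = ' '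
      · simp only [List.filter_cons, decide_eq_true hc, List.foldl_cons]
        exact ih (pvStepA st c)
      · simp only [List.filter_cons, decide_eq_false hc, List.foldl_cons, pvStepA_junk st c hc]
        exact ih st

theorem pvBfold_eq (ps : List (List Char)) (res : List (String × Bool)) (gap : Nat) :
    (ps.foldl pvStepB (res, gap)).1 = pvBfold res gap ps := by
  induction ps generalizing res gap with
  | nil => rfl
  | cons p ps ih =>
      by_cases hp : p = []
      · simpa [pvStepB, hp, pvBfold] using ih res (gap + 1)
      · simpa [pvStepB, hp, pvBfold] using ih _ 0

theorem pvAfin_cons (st : List (String × Bool) × List Char × Nat × Bool) (c : Char) (ws : List Char) :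
    pvAfin st (c :: ws) = pvAfin (pvStepA st c) ws := rfl

-- Morse-character step of the main induction (shared by '.' and '-').
theorem pvMainMorse (c : Char) (ws : List Char) (hm : c = '.' ∨ c = '-')
    (ih2 : ∀ res cc pending p ps, cc ≠ [] → List.splitOn ' ' ws = p :: ps →
      pvAfin (res, cc, 0, pending) ws
        = pvBfold (res ++ [(String.ofList (cc ++ p), if res.length > 0 then pending else false)]) 0 ps) :
    (∀ res sc gap, (res = [] → gap = sc) → (res ≠ [] → sc = gap + 1) →
      pvAfin (res, [], sc, false) (c :: ws) = pvBfold res gap (List.splitOn ' ' (c :: ws)))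
    ∧ (∀ res cc pending p ps, cc ≠ [] → List.splitOn ' ' (c :: ws) = p :: ps →
      pvAfin (res, cc, 0, pending) (c :: ws)
        = pvBfold (res ++ [(String.ofList (cc ++ p), if res.length > 0 then pending else false)]) 0 ps) := by
  obtain ⟨p', ps', hsp⟩ := List.exists_cons_of_ne_nil
    (show List.splitOn ' ' ws ≠ [] from List.splitOnP_ne_nil _ ws)
  have hCne : (c == ' ') = false := by rcases hm with rfl | rfl <;> decide
  have hsplit_cons : List.splitOn ' ' (c :: ws) = (c :: p') :: ps' := by
    unfold List.splitOn
    rw [List.splitOnP_cons, if_neg (by simp [hCne])]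
    unfold List.splitOn at hsp
    rw [hsp, List.modifyHead_cons]
  refine ⟨fun res sc gap h1 h2 => ?_, fun res cc pending p ps hcc hsplit => ?_⟩
  · have hstep : pvStepA (res, [], sc, false) c
        = (res, [c], 0, if sc ≥ 3 then true else false) := by
      rcases hm with rfl | rfl <;> simp [pvStepA]
    have hflag : (if res.length > 0 then (if sc ≥ 3 then true else false) else false)
        = (decide (res.length > 0) && decide (gap + 1 ≥ 3)) := by
      cases res with
      | nil => simp
      | cons a rs =>
          rw [h2 (by simp)]
          by_cases h3 : gap + 1 ≥ 3 <;> simp [h3]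
    rw [pvAfin_cons, hstep, ih2 res [c] _ p' ps' (by simp) hsp, hsplit_cons, hflag]
    simp [pvBfold]
  · rw [hsplit_cons, List.cons.injEq] at hsplit
    obtain ⟨rfl, rfl⟩ := hsplit
    have hstep : pvStepA (res, cc, 0, pending) c = (res, cc ++ [c], 0, pending) := by
      rcases hm with rfl | rfl <;> simp [pvStepA]
    rw [pvAfin_cons, hstep, ih2 res (cc ++ [c]) pending p' ps' (by simp) hsp]
    simp

-- The main correspondence between A's character machine and B's piece fold,
-- on character lists over the alphabet {'.', '-', ' '}.
theorem pvMain (ws : List Char) (hws : ∀ c ∈ ws, c = '.' ∨ c = '-' ∨ c = ' ') :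
    (∀ res sc gap, (res = [] → gap = sc) → (res ≠ [] → sc = gap + 1) →
      pvAfin (res, [], sc, false) ws = pvBfold res gap (List.splitOn ' ' ws))
    ∧ (∀ res cc pending p ps, cc ≠ [] → List.splitOn ' ' ws = p :: ps →
      pvAfin (res, cc, 0, pending) ws
        = pvBfold (res ++ [(String.ofList (cc ++ p), if res.length > 0 then pending else false)]) 0 ps) := by
  induction ws with
  | nil =>
    refine ⟨fun res sc gap h1 h2 => ?_, fun res cc pending p ps hcc hsplit => ?_⟩
    · simp [pvAfin, List.splitOn, List.splitOnP_nil, pvBfold]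
    · simp only [List.splitOn, List.splitOnP_nil, List.cons.injEq] at hsplit
      obtain ⟨rfl, rfl⟩ := hsplit
      simp [pvAfin, pvBfold, hcc]
  | cons c ws ih =>
    have hc : c = '.' ∨ c = '-' ∨ c = ' ' := hws c (List.mem_cons_self ..)
    have htail : ∀ d ∈ ws, d = '.' ∨ d = '-' ∨ d = ' ' :=
      fun d hd => hws d (List.mem_cons_of_mem _ hd)
    obtain ⟨ih1, ih2⟩ := ih htail
    rcases hc with hc | hc | hc
    · exact hc ▸ pvMainMorse c ws (Or.inl hc) ih2
    · exact hc ▸ pvMainMorse c ws (Or.inr hc) ih2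
    · subst hc
      have hsplit_sp : List.splitOn ' ' (' ' :: ws) = [] :: List.splitOn ' ' ws := by
        unfold List.splitOn
        rw [List.splitOnP_cons, if_pos (by decide)]
      refine ⟨fun res sc gap h1 h2 => ?_, fun res cc pending p ps hcc hsplit => ?_⟩
      · have hstep : pvStepA (res, [], sc, false) ' ' = (res, [], sc + 1, false) := by
          simp [pvStepA]
        rw [pvAfin_cons, hstep, hsplit_sp,
          ih1 res (sc + 1) (gap + 1) (fun h => by rw [h1 h]) (fun h => by rw [h2 h])]
        simp [pvBfold]
      · rw [hsplit_sp, List.cons.injEq] at hsplit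
        obtain ⟨rfl, rfl⟩ := hsplit
        have hstep : pvStepA (res, cc, 0, pending) ' '
            = (res ++ [(String.ofList cc, if res.length > 0 then pending else false)], [], 1, false) := by
          simp [pvStepA, hcc]
        rw [pvAfin_cons, hstep,
          ih1 _ 1 0 (fun h => absurd h (by simp)) (fun _ => rfl)]
        simp

theorem pvAfinI_eq (ws : List Char) : pvAfinI ws = pvAfin ([], [], 0, false) ws := by
  simp only [pvAfinI, pvAfin, pvFoldAI]

theorem pvAfin_filter (st : List (String × Bool) × List Char × Nat × Bool) (ws : List Char) :
    pvAfin st ws = pvAfin st (ws.filter (fun c => decide (c = '.' ∨ c = '-' ∨ c = ' '))) := by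
  simp only [pvAfin, ← pvFoldA_filter]

-- The two port bodies after the (shared) normalization and strip, as one equation.
theorem pvBody (t : String) :
    (if t = "" then ([] : List (String × Bool)) else pvAfinI t.toList) = pvTailB t := by
  by_cases ht : t = ""
  · rw [if_pos ht, ht]
    simp [pvTailB, List.splitOn, List.splitOnP_nil, pvStepB]
  · rw [if_neg ht, pvAfinI_eq, pvAfin_filter]
    simp only [pvTailB]
    rw [pvBfold_eq]
    have hfilt : ∀ c ∈ t.toList.filter (fun c => decide (c = '.' ∨ c = '-' ∨ c = ' ')),
        c = '.' ∨ c = '-' ∨ c = ' ' :=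
      fun c hcl => of_decide_eq_true (List.mem_filter.mp hcl).2
    exact (pvMain _ hfilt).1 [] 0 0 (fun _ => rfl) (fun h => absurd rfl h)

-- ===== VERDICT (by name: the statement is the Claim_ definition above) =====
theorem parse_raw_line_spec : Claim_equal_parse_raw_line := by
  intro line _
  unfold Spec_parse_raw_line parse_raw_line parse_raw_line_alt
  exact pvBody _
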